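-- pv_equiv track=rewrite | github.com/alexgooding/advent-of-code | day_6/puzzle_1.py | get_marker_location
-- ===== SOURCE A (Python) =====
-- def get_marker_location(s: str) -> int:
--     counter = 0
--     previous_chars = []
--     for c in s:
--         if c in previous_chars:
--             previous_chars = previous_chars[previous_chars.index(c)+1:]
--         previous_chars.append(c)
--         counter += 1
--         if len(previous_chars) == 4:
--             break
--
--     return counter
-- ===== SOURCE B (Python) =====
-- def get_marker_location(s: str) -> int:
--     for i in range(len(s)):
--         if i >= 3 and len(set(s[i-3:i+1])) == 4:
--             return i + 1
--     return len(s)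
-- ===== Notes on version B (the rewrite author's own statement) =====
-- stated objective: simpler
-- what changed: B replaces A's stateful scan that maintains and trims an incremental distinct-suffix list with a stateless index loop that tests each fixed 4-character window for distinctness via a set, returning len(s) when no marker exists.
import Mathlib
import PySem

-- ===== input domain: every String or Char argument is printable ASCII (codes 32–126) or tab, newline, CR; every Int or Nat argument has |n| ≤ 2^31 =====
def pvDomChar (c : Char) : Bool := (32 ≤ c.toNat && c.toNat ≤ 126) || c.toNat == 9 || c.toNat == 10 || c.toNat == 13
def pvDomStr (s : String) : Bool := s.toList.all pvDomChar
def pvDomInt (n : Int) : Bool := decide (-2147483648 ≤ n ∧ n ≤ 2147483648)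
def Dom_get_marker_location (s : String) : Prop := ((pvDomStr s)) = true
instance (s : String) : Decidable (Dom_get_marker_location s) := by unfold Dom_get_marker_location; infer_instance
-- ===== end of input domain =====

-- B replaces A's stateful scan (maintaining and trimming an incremental distinct-suffix list)
-- with a stateless index loop testing each fixed 4-character window for distinctness via a set
-- (objective: simpler; same O(n) cost).

-- ===== PORT A =====
-- one iteration of A's loop body on `previous_chars` for character c:
-- trim at the first occurrence of c (previous_chars[previous_chars.index(c)+1:]), then append c
def pvStep (prev : List Char) (c : Char) : List Char :=
  (if prev.contains c then
      PySem.List.slice prev (some (((PySem.List.index? prev c).getD 0 + 1 : Nat) : Int)) none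
    else prev) ++ [c]

-- A's for-loop with break: recursion over the remaining characters, state = (counter, previous_chars)
def pvGoA : List Char → Int → List Char → Int
  | [], counter, _ => counter
  | c :: cs, counter, prev =>
    let prev2 := pvStep prev c
    if prev2.length = 4 then counter + 1 else pvGoA cs (counter + 1) prev2

def get_marker_location (s : String) : Int := pvGoA s.toList 0 []

-- ===== PORT B =====
-- B's for-loop over range(len(s)): if i >= 3 and len(set(s[i-3:i+1])) == 4: return i+1; else fall through to len(s)
def pvGoB (cs : List Char) : List Int → Int
  | [] => (cs.length : Int)
  | i :: rest =>
    if 3 ≤ i ∧ PySem.Set.len (PySem.Set.ofList (PySem.List.slice cs (some (i - 3)) (some (i + 1)))) = 4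
    then i + 1
    else pvGoB cs rest

def get_marker_location_alt (s : String) : Int :=
  pvGoB s.toList (PySem.List.pyRange 0 (PySem.List.len s.toList) 1)

-- ===== PRECONDITION & SPEC =====
def Spec_get_marker_location (s : String) (out : Int) : Prop := out = get_marker_location_alt s
instance (s : String) (out : Int) : Decidable (Spec_get_marker_location s out) := by unfold Spec_get_marker_location; infer_instance

-- ===== CLAIM (what is proved, stated in full; the proofs are below) =====
def Claim_equal_get_marker_location : Prop := ∀ (s : String), Dom_get_marker_location s → Spec_get_marker_location s (get_marker_location s)

-- ===== LEMMAS AND PROOFS =====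

-- Loop invariant of A: `prev` is the longest duplicate-free suffix of the processed prefix `p`
-- (phrased as: a Nodup suffix whose immediately preceding character, if any, reoccurs in it),
-- and it has length ≤ 3 (A breaks as soon as it reaches 4).
def pvInv (p prev : List Char) : Prop :=
  prev.length ≤ 3 ∧ prev.Nodup ∧
    ∃ t, p = t ++ prev ∧ (t = [] ∨ ∃ x, t.getLast? = some x ∧ x ∈ prev)

-- maximality: any Nodup suffix of p is no longer than prev
lemma pvMaximal (p prev q : List Char) (_hnd : prev.Nodup)
    (ht : ∃ t, p = t ++ prev ∧ (t = [] ∨ ∃ x, t.getLast? = some x ∧ x ∈ prev))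
    (hq : q <:+ p) (hqnd : q.Nodup) : q.length ≤ prev.length := by
  obtain ⟨t, hp, hlast⟩ := ht
  by_contra hgt0
  have hgt : prev.length < q.length := Nat.lt_of_not_le hgt0
  have hps : prev <:+ p := ⟨t, hp.symm⟩
  have hpq : prev <:+ q := by
    rcases List.suffix_or_suffix_of_suffix hq hps with h | h
    · exact absurd h.length_le (Nat.not_le.mpr hgt)
    · exact h
  obtain ⟨u, hu⟩ := hpq
  have hune : u ≠ [] := by
    intro h0
    rw [h0, List.nil_append] at hu
    rw [hu] at hgt
    omega
  obtain ⟨r, hr⟩ := hq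
  have htru : t = r ++ u := by
    have : t ++ prev = (r ++ u) ++ prev := by
      rw [← hp, ← hr, ← hu, List.append_assoc]
    exact List.append_cancel_right this
  have htne : t ≠ [] := by
    intro h0; rw [h0] at htru
    exact hune (List.append_eq_nil_iff.mp htru.symm).2
  obtain ⟨x, hx, hxp⟩ := hlast.resolve_left htne
  have hxu : x ∈ u := by
    have : u.getLast? = some x := by
      rw [htru, List.getLast?_append] at hx
      cases h : u.getLast? with
      | none => exact absurd h (by simpa using List.getLast?_isSome.mpr hune)
      | some y => rw [h] at hx; simpa [h] using hx
    exact List.mem_of_getLast? this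
  have := (List.nodup_append.mp (hu ▸ hqnd)).2.2 x hxu x hxp
  exact this rfl

-- one step of A preserves the invariant shape (length grows by at most one)
lemma pvStep_spec (p prev c) (h : pvInv p prev) :
    (pvStep prev c).Nodup ∧ (pvStep prev c).length ≤ prev.length + 1 ∧
      ∃ t, p ++ [c] = t ++ pvStep prev c ∧
        (t = [] ∨ ∃ x, t.getLast? = some x ∧ x ∈ pvStep prev c) := by
  obtain ⟨hle, hnd, t, hp, hlast⟩ := h
  by_cases hc : c ∈ prev
  · -- c occurs in prev: trim through its (unique) first occurrence
    obtain ⟨k, hk⟩ := Option.isSome_iff_exists.mp ((PySem.List.index?_isSome_iff prev c).mpr hc)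
    obtain ⟨pre, suf, hsplit, hlen, hcpre⟩ := (PySem.List.index?_eq_some_iff prev c k).mp hk
    have hstep : pvStep prev c = suf ++ [c] := by
      unfold pvStep
      rw [if_pos (by simpa using hc), hk]
      simp only [Option.getD_some, PySem.List.slice_from_natCast, hsplit]
      rw [show k + 1 = (pre ++ [c]).length by simp [hlen],
        show pre ++ c :: suf = (pre ++ [c]) ++ suf by simp, List.drop_left]
    have hcs : (c :: suf).Nodup := by
      have := hsplit ▸ hnd
      exact (List.nodup_append.mp this).2.1
    constructor
    · rw [hstep, List.nodup_append]
      refine ⟨hcs.of_cons, List.nodup_singleton c, ?_⟩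
      intro a ha b hb
      simp at hb; subst hb
      exact fun h0 => (List.nodup_cons.mp hcs).1 (h0 ▸ ha)
    constructor
    · rw [hstep]; have : prev.length = pre.length + 1 + suf.length := by
        rw [hsplit]; simp; omega
      simp; omega
    · refine ⟨t ++ pre ++ [c], ?_, Or.inr ⟨c, ?_, by simp [hstep]⟩⟩
      · rw [hstep, hp, hsplit]; simp
      · simp
  · -- c not in prev: just append
    have hstep : pvStep prev c = prev ++ [c] := by
      unfold pvStep
      rw [if_neg (by simpa using hc)]
    constructor
    · rw [hstep, List.nodup_append]
      exact ⟨hnd, List.nodup_singleton c, by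
        intro a ha b hb; simp at hb; subst hb
        exact fun h0 => hc (h0 ▸ ha)⟩
    constructor
    · rw [hstep]; simp
    · refine ⟨t, by rw [hstep, hp, List.append_assoc], ?_⟩
      rcases hlast with h0 | ⟨x, hx, hxp⟩
      · exact Or.inl h0
      · exact Or.inr ⟨x, hx, by simp [hstep, hxp]⟩

-- characterisation: the new suffix-state has length 4 iff the last 4 characters are distinct
lemma pvCond (p' prev2 : List Char) (hnd : prev2.Nodup) (hle : prev2.length ≤ 4)
    (ht : ∃ t, p' = t ++ prev2 ∧ (t = [] ∨ ∃ x, t.getLast? = some x ∧ x ∈ prev2)) :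
    prev2.length = 4 ↔ 4 ≤ p'.length ∧ (p'.drop (p'.length - 4)).Nodup := by
  constructor
  · intro h4
    obtain ⟨t, hp, -⟩ := ht
    subst hp
    have hlen : (t ++ prev2).length = t.length + 4 := by simp [h4]
    refine ⟨by omega, ?_⟩
    rw [show (t ++ prev2).length - 4 = t.length by omega, List.drop_left]
    exact hnd
  · rintro ⟨h4, hqnd⟩
    have hq : p'.drop (p'.length - 4) <:+ p' := List.drop_suffix _ _
    have hql : (p'.drop (p'.length - 4)).length = 4 := by
      rw [List.length_drop]; omega
    have := pvMaximal p' prev2 _ hnd ht hq hqnd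
    omega

-- set(w) has as many elements as w iff w has no duplicates
lemma pvOfListSublist {α : Type} [BEq α] (xs : List α) :
    (PySem.Set.ofList xs).Sublist xs := by
  induction xs using List.reverseRecOn with
  | nil => simp [PySem.Set.ofList_nil]
  | append_singleton xs x ih =>
    rw [PySem.Set.ofList_append_singleton]
    unfold PySem.Set.add
    split
    · exact ih.trans (List.sublist_append_left xs [x])
    · exact List.Sublist.append ih (List.Sublist.refl [x])

lemma pvSetLen (w : List Char) :
    (PySem.Set.ofList w).length = w.length ↔ w.Nodup := by
  constructor
  · intro h
    have := (pvOfListSublist w).eq_of_length h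
    rw [← this]; exact PySem.Set.nodup_ofList w
  · intro h; rw [PySem.Set.ofList_eq_self_of_nodup w h]

-- the window slice of the full string is exactly the last 4 characters of the processed prefix
lemma pvWindow (p : List Char) (c : Char) (cs : List Char) (h3 : 3 ≤ p.length) :
    PySem.List.slice (p ++ c :: cs) (some ((p.length : Int) - 3)) (some ((p.length : Int) + 1))
      = (p ++ [c]).drop ((p ++ [c]).length - 4) := by
  have e1 : ((p.length : Int) - 3) = ((p.length - 3 : Nat) : Int) := by push_cast [h3]; omega
  have e2 : ((p.length : Int) + 1) = ((p.length + 1 : Nat) : Int) := by push_cast; ring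
  rw [e1, e2, PySem.List.slice_natCast]
  have hfull : p ++ c :: cs = (p ++ [c]) ++ cs := by simp
  rw [hfull, List.drop_append_of_le_length (by simp only [List.length_append, List.length_cons, List.length_nil]; omega)]
  have hwl : ((p ++ [c]).drop (p.length - 3)).length = 4 := by
    simp [List.length_drop]; omega
  rw [List.take_left' (by rw [hwl]; omega),
    show (p ++ [c]).length - 4 = p.length - 3 by simp only [List.length_append, List.length_cons, List.length_nil]; omega]

-- main induction: A's loop from state (p.length, prev) equals B's loop from index p.length
lemma pvMain (cs : List Char) : ∀ (p prev : List Char), pvInv p prev →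
    pvGoA cs (p.length : Int) prev =
      pvGoB (p ++ cs) (PySem.List.pyRange (p.length : Int) (((p ++ cs).length : Nat) : Int) 1) := by
  induction cs with
  | nil =>
    intro p prev _
    rw [PySem.List.pyRange_one_eq_nil (by simp)]
    simp [pvGoA, pvGoB]
  | cons c cs ih =>
    intro p prev hInv
    have hlt : (p.length : Int) < ((p ++ c :: cs).length : Nat) := by
      simp only [List.length_append, List.length_cons]
      push_cast
      omega
    rw [PySem.List.pyRange_one_cons hlt]
    obtain ⟨hnd2, hle2, ht2⟩ := pvStep_spec p prev c hInv
    have hle4 : (pvStep prev c).length ≤ 4 := by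
      have := hInv.1; omega
    -- B's window condition at index p.length ↔ new suffix-state has length 4
    have hcond : (3 ≤ (p.length : Int) ∧
        PySem.Set.len (PySem.Set.ofList (PySem.List.slice (p ++ c :: cs)
          (some ((p.length : Int) - 3)) (some ((p.length : Int) + 1)))) = 4)
        ↔ (pvStep prev c).length = 4 := by
      rw [pvCond (p ++ [c]) (pvStep prev c) hnd2 hle4 ht2]
      constructor
      · rintro ⟨h3i, hset⟩
        have h3 : 3 ≤ p.length := by exact_mod_cast h3i
        rw [pvWindow p c cs h3] at hset
        have hwl : ((p ++ [c]).drop ((p ++ [c]).length - 4)).length = 4 := by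
          simp [List.length_drop]; omega
        refine ⟨by simp; omega, ?_⟩
        rw [← pvSetLen, hwl]
        unfold PySem.Set.len at hset
        exact_mod_cast hset
      · rintro ⟨h4, hqnd⟩
        have h3 : 3 ≤ p.length := by simp at h4; omega
        refine ⟨by exact_mod_cast h3, ?_⟩
        rw [pvWindow p c cs h3]
        have hwl : ((p ++ [c]).drop ((p ++ [c]).length - 4)).length = 4 := by
          simp [List.length_drop]; omega
        unfold PySem.Set.len
        rw [(pvSetLen _).mpr hqnd, hwl]
        norm_num
    show (if (pvStep prev c).length = 4 then (p.length : Int) + 1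
        else pvGoA cs ((p.length : Int) + 1) (pvStep prev c)) = _
    rw [pvGoB]
    by_cases h4 : (pvStep prev c).length = 4
    · rw [if_pos h4, if_pos (hcond.mpr h4)]
    · rw [if_neg h4, if_neg (fun hh => h4 (hcond.mp hh))]
      have hInv' : pvInv (p ++ [c]) (pvStep prev c) := ⟨by omega, hnd2, ht2⟩
      have := ih (p ++ [c]) (pvStep prev c) hInv'
      rw [show ((p ++ [c]).length : Int) = (p.length : Int) + 1 by simp] at this
      rw [show (p ++ [c]) ++ cs = p ++ c :: cs by simp] at this
      exact this

-- ===== VERDICT (by name: the statement is the Claim_ definition above) =====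
theorem get_marker_location_spec : Claim_equal_get_marker_location := by
  intro s _
  unfold Spec_get_marker_location get_marker_location get_marker_location_alt
  have h := pvMain s.toList [] [] ⟨by simp, List.nodup_nil, ⟨[], rfl, Or.inl rfl⟩⟩
  simpa [PySem.List.len_eq] using h
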